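-- pv_equiv track=rewrite | github.com/BlackJacket-Composer/CanonMaker | PythonFiles/TripleCanon.py | parallel_checker
-- ===== SOURCE A (Python) =====
-- def parallel_checker(intervals):
--     checker = 1
--     parallel_fifths = 0
--     parallel_octaves = 0
--     thirds = [3, 4]
--     sixths = [8, 9]
--     for x in range(1, len(intervals)):
--         if intervals[x] == 7 and intervals[x - 1] == 7:
--             # print "parallel fifths"
--             checker += 1
--             parallel_fifths += 1
--         elif intervals[x] == 0 and intervals[x - 1] == 0:
--             # print "parallel octaves"
--             checker += 1
--             parallel_octaves += 1
--     for x in range(3, len(intervals)):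
--         if intervals[x - 3] in thirds and intervals[x - 2] in thirds and intervals[x - 1] in thirds \
--                 and intervals[x] in thirds:
--             checker += 1
--             # print "3 motion too similar"
--         elif intervals[x - 3] in sixths and intervals[x - 2] in sixths and intervals[x - 1] in sixths \
--                 and intervals[x] in sixths:
--             checker += 1
--             # print "6 motion too similar"
--     if checker > 1:
--         return False
--     else:
--         return True
-- ===== SOURCE B (Python) =====
-- def parallel_checker(intervals):
--     # Single forward pass with early exit: check each adjacent pair for
--     # parallel fifths/octaves, and maintain run-length counters for motion
--     # in thirds {3,4} and sixths {8,9}; four in a row is a violation.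
--     prev = None
--     run3 = 0
--     run6 = 0
--     for v in intervals:
--         if prev is not None and ((v == 7 and prev == 7) or (v == 0 and prev == 0)):
--             return False
--         run3 = run3 + 1 if v in (3, 4) else 0
--         run6 = run6 + 1 if v in (8, 9) else 0
--         if run3 >= 4 or run6 >= 4:
--             return False
--         prev = v
--     return True
-- ===== Notes on version B (the rewrite author's own statement) =====
-- stated objective: alternative
-- what changed: Two index-based passes (pair scan plus a 4-element backward-window membership re-scan at every position) counting violations into a counter are replaced by one forward value pass that keeps run-length counters for thirds/sixths and exits on the first violation.
import Mathlib
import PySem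

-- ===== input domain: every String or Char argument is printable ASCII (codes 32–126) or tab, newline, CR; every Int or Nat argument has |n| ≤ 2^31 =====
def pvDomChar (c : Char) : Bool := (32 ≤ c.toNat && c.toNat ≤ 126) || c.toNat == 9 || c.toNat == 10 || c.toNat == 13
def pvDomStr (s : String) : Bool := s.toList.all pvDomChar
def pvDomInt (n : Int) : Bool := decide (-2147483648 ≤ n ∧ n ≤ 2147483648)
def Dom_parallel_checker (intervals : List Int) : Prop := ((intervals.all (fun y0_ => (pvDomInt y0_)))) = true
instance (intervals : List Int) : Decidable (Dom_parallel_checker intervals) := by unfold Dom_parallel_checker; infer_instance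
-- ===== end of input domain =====

-- B replaces A's two counting index passes (pair scan + 4-window membership re-scan)
-- by one forward pass with run-length counters and early exit; return values proved equal.


-- ===== PORT A =====
-- literal transliteration; the Python also counts parallel_fifths / parallel_octaves,
-- which are written but never read − they are carried in the state triple likewise.
def parallel_checker (intervals : List Int) : Bool :=
  let thirds : List Int := [3, 4]
  let sixths : List Int := [8, 9]
  let s1 : Int × Int × Int :=
    (PySem.List.pyRange 1 (intervals.length : Int) 1).foldl (fun s x =>
      if PySem.List.pyGetD intervals x 0 = 7 ∧ PySem.List.pyGetD intervals (x - 1) 0 = 7 then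
        (s.1 + 1, s.2.1 + 1, s.2.2)
      else if PySem.List.pyGetD intervals x 0 = 0 ∧ PySem.List.pyGetD intervals (x - 1) 0 = 0 then
        (s.1 + 1, s.2.1, s.2.2 + 1)
      else s) (1, 0, 0)
  let checker : Int :=
    (PySem.List.pyRange 3 (intervals.length : Int) 1).foldl (fun c x =>
      if PySem.List.pyGetD intervals (x - 3) 0 ∈ thirds ∧ PySem.List.pyGetD intervals (x - 2) 0 ∈ thirds ∧
         PySem.List.pyGetD intervals (x - 1) 0 ∈ thirds ∧ PySem.List.pyGetD intervals x 0 ∈ thirds then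
        c + 1
      else if PySem.List.pyGetD intervals (x - 3) 0 ∈ sixths ∧ PySem.List.pyGetD intervals (x - 2) 0 ∈ sixths ∧
              PySem.List.pyGetD intervals (x - 1) 0 ∈ sixths ∧ PySem.List.pyGetD intervals x 0 ∈ sixths then
        c + 1
      else c) s1.1
  if checker > 1 then false else true

-- ===== PORT B =====
def pcBad (prev : Option Int) (v : Int) : Bool :=
  match prev with
  | some p => (v == 7 && p == 7) || (v == 0 && p == 0)
  | none => false

def pcGo (prev : Option Int) (run3 run6 : Nat) (l : List Int) : Bool :=
  match l with
  | [] => true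
  | v :: rest =>
    if pcBad prev v then false
    else
      let r3 := if v == 3 || v == 4 then run3 + 1 else 0
      let r6 := if v == 8 || v == 9 then run6 + 1 else 0
      if 4 ≤ r3 || 4 ≤ r6 then false
      else pcGo (some v) r3 r6 rest

def parallel_checker_alt (intervals : List Int) : Bool :=
  pcGo none 0 0 intervals

-- ===== PRECONDITION & SPEC =====
def Spec_parallel_checker (intervals : List Int) (out : Bool) : Prop := out = parallel_checker_alt intervals
instance (intervals : List Int) (out : Bool) : Decidable (Spec_parallel_checker intervals out) := by unfold Spec_parallel_checker; infer_instance

-- ===== CLAIM (what is proved, stated in full; the proofs are below) =====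
def Claim_equal_parallel_checker : Prop := ∀ (intervals : List Int), Dom_parallel_checker intervals → Spec_parallel_checker intervals (parallel_checker intervals)

-- ===== LEMMAS AND PROOFS =====

-- structural middle predicates
def badPair (p v : Int) : Bool := (v == 7 && p == 7) || (v == 0 && p == 0)

def pairAt : List Int → Bool
  | a :: b :: _ => badPair a b
  | _ => false

def hasPair : List Int → Bool
  | a :: b :: t => badPair a b || hasPair (b :: t)
  | _ => false

def prefixSat (s : Int → Bool) : Nat → List Int → Bool
  | 0, _ => true
  | _ + 1, [] => false
  | m + 1, v :: t => s v && prefixSat s m t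

def hasWin (s : Int → Bool) : List Int → Bool
  | a :: b :: c :: d :: t => (s a && s b && s c && s d) || hasWin s (b :: c :: d :: t)
  | _ => false

def isThird (v : Int) : Bool := v == 3 || v == 4
def isSixth (v : Int) : Bool := v == 8 || v == 9

def pairOK : Option Int → List Int → Bool
  | _, [] => true
  | none, v :: t => pairOK (some v) t
  | some p, v :: t => !badPair p v && pairOK (some v) t

def runOK (s : Int → Bool) : Nat → List Int → Bool
  | _, [] => true
  | r, v :: t => if s v then decide (r + 1 < 4) && runOK s (r + 1) t else runOK s 0 t


-- ---- B-side characterisation ----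

theorem pairOK_some (l : List Int) : ∀ p : Int, pairOK (some p) l = !hasPair (p :: l) := by
  induction l with
  | nil => intro p; simp [pairOK, hasPair]
  | cons v t ih => intro p; simp [pairOK, hasPair, ih, Bool.not_or]

theorem pairOK_none (l : List Int) : pairOK none l = !hasPair l := by
  cases l with
  | nil => simp [pairOK, hasPair]
  | cons v t => rw [show pairOK none (v :: t) = pairOK (some v) t from rfl, pairOK_some]

theorem win_cons (s : Int → Bool) (v : Int) (t : List Int) :
    hasWin s (v :: t) = (prefixSat s 4 (v :: t) || hasWin s t) := by
  rcases t with _ | ⟨b, _ | ⟨c, _ | ⟨d, t'⟩⟩⟩ <;>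
    simp [hasWin, prefixSat, Bool.and_assoc]

theorem prefixSat_length (s : Int → Bool) : ∀ (m : Nat) (l : List Int),
    prefixSat s m l = true → m ≤ l.length := by
  intro m
  induction m with
  | zero => intro l _; omega
  | succ k ih =>
    intro l h
    cases l with
    | nil => simp [prefixSat] at h
    | cons v t =>
      simp only [prefixSat, Bool.and_eq_true] at h
      have := ih t h.2
      simp; omega

theorem prefix_mono (s : Int → Bool) : ∀ (l : List Int) (m m' : Nat), m ≤ m' →
    prefixSat s m' l = true → prefixSat s m l = true := by
  intro l
  induction l with
  | nil =>
    intro m m' h hp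
    cases m' with
    | zero => have : m = 0 := by omega
              subst this; exact hp
    | succ k => simp [prefixSat] at hp
  | cons v t ih =>
    intro m m' h hp
    cases m with
    | zero => simp [prefixSat]
    | succ k =>
      cases m' with
      | zero => omega
      | succ k' =>
        simp only [prefixSat, Bool.and_eq_true] at hp ⊢
        exact ⟨hp.1, ih k k' (by omega) hp.2⟩

theorem win_of_prefix4 (s : Int → Bool) (l : List Int) (h : prefixSat s 4 l = true) :
    hasWin s l = true := by
  rcases l with _ | ⟨a, _ | ⟨b, _ | ⟨c, _ | ⟨d, t⟩⟩⟩⟩ <;>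
    simp_all [prefixSat, hasWin]

theorem runOK_eq (s : Int → Bool) (l : List Int) : ∀ r : Nat, r ≤ 3 →
    runOK s r l = (!prefixSat s (4 - r) l && !hasWin s l) := by
  induction l with
  | nil =>
    intro r hr
    obtain ⟨k, hk⟩ : ∃ k, 4 - r = k + 1 := ⟨3 - r, by omega⟩
    rw [hk]; simp [runOK, prefixSat, hasWin]
  | cons v t ih =>
    intro r hr
    by_cases hs : s v = true
    · rw [runOK, if_pos hs]
      by_cases hr3 : r = 3
      · subst hr3
        have h1 : (4 : Nat) - 3 = 0 + 1 := by omega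
        rw [h1]
        simp [prefixSat, hs]
      · have h4 : 4 - r = (3 - r) + 1 := by omega
        have h3 : 4 - (r + 1) = 3 - r := by omega
        rw [ih (r + 1) (by omega), h4, h3, win_cons]
        have hdec : (decide (r + 1 < 4)) = true := by simp; omega
        rw [hdec, Bool.true_and]
        have hp4 : prefixSat s 4 (v :: t) = prefixSat s 3 t := by
          simp [prefixSat, hs]
        rw [hp4]
        have hps : prefixSat s (3 - r + 1) (v :: t) = prefixSat s (3 - r) t := by
          simp [prefixSat, hs]
        rw [hps, Bool.not_or]
        by_cases hP : prefixSat s (3 - r) t = true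
        · simp [hP]
        · have hP3 : prefixSat s 3 t = false := by
            cases h3' : prefixSat s 3 t
            · rfl
            · exact absurd (prefix_mono s t (3 - r) 3 (by omega) h3') hP
          simp at hP
          simp [hP, hP3]
    · have hs' : s v = false := by simp at hs; exact hs
      rw [runOK, if_neg (by simp [hs'])]
      rw [ih 0 (by omega)]
      obtain ⟨k, hk⟩ : ∃ k, 4 - r = k + 1 := ⟨3 - r, by omega⟩
      rw [hk, win_cons]
      have hp : prefixSat s (k + 1) (v :: t) = false := by simp [prefixSat, hs']
      have hp4 : prefixSat s 4 (v :: t) = false := by simp [prefixSat, hs']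
      rw [hp, hp4]
      by_cases hw : prefixSat s 4 t = true
      · have := win_of_prefix4 s t hw
        simp [this, hw]
      · simp at hw
        simp [hw]

theorem pcGo_eq (l : List Int) : ∀ (prev : Option Int) (r3 r6 : Nat),
    pcGo prev r3 r6 l = (pairOK prev l && (runOK isThird r3 l && runOK isSixth r6 l)) := by
  induction l with
  | nil => intro prev r3 r6; cases prev <;> simp [pcGo, pairOK, runOK]
  | cons v t ih =>
    intro prev r3 r6
    rw [pcGo]
    by_cases hb : pcBad prev v = true
    · rw [if_pos hb]
      cases prev with
      | none => simp [pcBad] at hb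
      | some p =>
        have hbp : badPair p v = true := hb
        simp [pairOK, hbp]
    · rw [if_neg hb]
      have hpair : pairOK prev (v :: t) = pairOK (some v) t := by
        cases prev with
        | none => rfl
        | some p =>
          have hbp : badPair p v = false := by
            cases h : badPair p v
            · rfl
            · exact absurd (show pcBad (some p) v = true from h) hb
          simp [pairOK, hbp]
      rw [hpair]
      have h3eq : runOK isThird r3 (v :: t) =
          (!(decide (4 ≤ (if v == 3 || v == 4 then r3 + 1 else 0))) &&
            runOK isThird (if v == 3 || v == 4 then r3 + 1 else 0) t) := by
        by_cases h : (v == 3 || v == 4) = true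
        · rw [runOK, if_pos (show isThird v = true from h), if_pos h]
          have : decide (r3 + 1 < 4) = !decide (4 ≤ r3 + 1) := by
            by_cases hh : 4 ≤ r3 + 1 <;> simp [hh] <;> try omega
          rw [this]
        · simp only [Bool.not_eq_true] at h
          rw [runOK, if_neg (by simp [show isThird v = false from h]), if_neg (by simp [h])]
          simp
      have h6eq : runOK isSixth r6 (v :: t) =
          (!(decide (4 ≤ (if v == 8 || v == 9 then r6 + 1 else 0))) &&
            runOK isSixth (if v == 8 || v == 9 then r6 + 1 else 0) t) := by
        by_cases h : (v == 8 || v == 9) = true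
        · rw [runOK, if_pos (show isSixth v = true from h), if_pos h]
          have : decide (r6 + 1 < 4) = !decide (4 ≤ r6 + 1) := by
            by_cases hh : 4 ≤ r6 + 1 <;> simp [hh] <;> try omega
          rw [this]
        · simp only [Bool.not_eq_true] at h
          rw [runOK, if_neg (by simp [show isSixth v = false from h]), if_neg (by simp [h])]
          simp
      rw [h3eq, h6eq]
      set a := (if v == 3 || v == 4 then r3 + 1 else 0) with ha
      set b := (if v == 8 || v == 9 then r6 + 1 else 0) with hb2
      show (if (decide (4 ≤ a) || decide (4 ≤ b)) = true then false else pcGo (some v) a b t) = _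
      rw [ih]
      by_cases h4a : 4 ≤ a <;> by_cases h4b : 4 ≤ b <;> simp [h4a, h4b]

theorem alt_eq (l : List Int) :
    parallel_checker_alt l = (!hasPair l && (!hasWin isThird l && !hasWin isSixth l)) := by
  rw [parallel_checker_alt, pcGo_eq, pairOK_none,
      runOK_eq isThird l 0 (by omega), runOK_eq isSixth l 0 (by omega)]
  by_cases h3 : prefixSat isThird 4 l = true
  · simp [h3, win_of_prefix4 _ _ h3]
  · by_cases h6 : prefixSat isSixth 4 l = true
    · simp [h6, win_of_prefix4 _ _ h6]
    · simp at h3 h6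
      simp [h3, h6]

-- ---- structural predicates as existentials over drop ----

theorem pair_cons (v : Int) (t : List Int) : hasPair (v :: t) = (pairAt (v :: t) || hasPair t) := by
  cases t <;> simp [hasPair, pairAt]

theorem hasPair_iff (l : List Int) : hasPair l = true ↔ ∃ i : Nat, pairAt (l.drop i) = true := by
  induction l with
  | nil => simp [hasPair, pairAt]
  | cons v t ih =>
    rw [pair_cons]
    simp only [Bool.or_eq_true, ih]
    constructor
    · rintro (h | ⟨j, hj⟩)
      · exact ⟨0, by simpa using h⟩
      · exact ⟨j + 1, by simpa using hj⟩
    · rintro ⟨i, hi⟩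
      cases i with
      | zero => exact Or.inl (by simpa using hi)
      | succ j => exact Or.inr ⟨j, by simpa using hi⟩

theorem hasWin_iff (s : Int → Bool) (l : List Int) :
    hasWin s l = true ↔ ∃ i : Nat, prefixSat s 4 (l.drop i) = true := by
  induction l with
  | nil => simp [hasWin, prefixSat]
  | cons v t ih =>
    rw [win_cons]
    simp only [Bool.or_eq_true, ih]
    constructor
    · rintro (h | ⟨j, hj⟩)
      · exact ⟨0, by simpa using h⟩
      · exact ⟨j + 1, by simpa using hj⟩
    · rintro ⟨i, hi⟩
      cases i with
      | zero => exact Or.inl (by simpa using hi)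
      | succ j => exact Or.inr ⟨j, by simpa using hi⟩

theorem pairAt_true_length (l : List Int) (i : Nat) (h : pairAt (l.drop i) = true) :
    i + 1 < l.length := by
  rcases hd : l.drop i with _ | ⟨a, _ | ⟨b, t⟩⟩ <;> rw [hd] at h
  · simp [pairAt] at h
  · simp [pairAt] at h
  · have := congrArg List.length hd
    simp [List.length_drop] at this
    omega

theorem pairAt_eq (l : List Int) (i : Nat) (h : i + 1 < l.length) :
    pairAt (l.drop i) = badPair (l[i]) (l[i+1]) := by
  rw [List.drop_eq_getElem_cons (by omega), List.drop_eq_getElem_cons (by omega)]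
  rfl

theorem prefix4_true_length (s : Int → Bool) (l : List Int) (i : Nat)
    (h : prefixSat s 4 (l.drop i) = true) : i + 3 < l.length := by
  have := prefixSat_length s 4 _ h
  simp [List.length_drop] at this
  omega

theorem prefix4_eq (s : Int → Bool) (l : List Int) (i : Nat) (h : i + 3 < l.length) :
    prefixSat s 4 (l.drop i) = (s l[i] && (s l[i+1] && (s l[i+2] && s l[i+3]))) := by
  rw [List.drop_eq_getElem_cons (by omega), List.drop_eq_getElem_cons (by omega),
      List.drop_eq_getElem_cons (by omega), List.drop_eq_getElem_cons (by omega)]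
  simp [prefixSat]

-- ---- index bridge ----

theorem getD_int (l : List Int) (i : Nat) (h : i < l.length) :
    PySem.List.pyGetD l (i : Int) 0 = l[i] := by
  rw [PySem.List.pyGetD_natCast]
  exact List.getD_eq_getElem l 0 h

theorem exists_pair_iff (l : List Int) :
    (∃ x ∈ PySem.List.pyRange 1 (l.length : Int) 1,
      (PySem.List.pyGetD l x 0 = 7 ∧ PySem.List.pyGetD l (x - 1) 0 = 7) ∨
      (PySem.List.pyGetD l x 0 = 0 ∧ PySem.List.pyGetD l (x - 1) 0 = 0)) ↔ hasPair l = true := by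
  rw [hasPair_iff]
  constructor
  · rintro ⟨x, hx, hhit⟩
    rw [PySem.List.mem_pyRange_one] at hx
    obtain ⟨i, hi⟩ : ∃ i : Nat, x = (i : Int) + 1 := ⟨(x - 1).toNat, by omega⟩
    have hlen : i + 1 < l.length := by omega
    refine ⟨i, ?_⟩
    rw [pairAt_eq l i hlen]
    have e1 : PySem.List.pyGetD l x 0 = l[i + 1] := by
      rw [show x = ((i + 1 : Nat) : Int) by push_cast; omega]
      exact getD_int l (i + 1) hlen
    have e0 : PySem.List.pyGetD l (x - 1) 0 = l[i] := by
      rw [show x - 1 = ((i : Nat) : Int) by omega]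
      exact getD_int l i (by omega)
    rw [e1, e0] at hhit
    simp [badPair]
    tauto
  · rintro ⟨i, hi⟩
    have hlen := pairAt_true_length l i hi
    rw [pairAt_eq l i hlen] at hi
    refine ⟨(i : Int) + 1, ?_, ?_⟩
    · rw [PySem.List.mem_pyRange_one]
      constructor
      · omega
      · push_cast; omega
    · have e1 : PySem.List.pyGetD l ((i : Int) + 1) 0 = l[i + 1] := by
        rw [show (i : Int) + 1 = ((i + 1 : Nat) : Int) by push_cast; omega]
        exact getD_int l (i + 1) hlen
      have e0 : PySem.List.pyGetD l ((i : Int) + 1 - 1) 0 = l[i] := by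
        rw [show (i : Int) + 1 - 1 = ((i : Nat) : Int) by omega]
        exact getD_int l i (by omega)
      rw [e1, e0]
      simp [badPair] at hi
      tauto

theorem exists_win_iff (s : Int → Bool) (l : List Int) :
    (∃ x ∈ PySem.List.pyRange 3 (l.length : Int) 1,
      s (PySem.List.pyGetD l (x - 3) 0) = true ∧ s (PySem.List.pyGetD l (x - 2) 0) = true ∧
      s (PySem.List.pyGetD l (x - 1) 0) = true ∧ s (PySem.List.pyGetD l x 0) = true) ↔
    hasWin s l = true := by
  rw [hasWin_iff]
  constructor
  · rintro ⟨x, hx, h0, h1, h2, h3⟩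
    rw [PySem.List.mem_pyRange_one] at hx
    obtain ⟨i, hi⟩ : ∃ i : Nat, x = (i : Int) + 3 := ⟨(x - 3).toNat, by omega⟩
    have hlen : i + 3 < l.length := by omega
    refine ⟨i, ?_⟩
    rw [prefix4_eq s l i hlen]
    have e0 : PySem.List.pyGetD l (x - 3) 0 = l[i] := by
      rw [show x - 3 = ((i : Nat) : Int) by omega]; exact getD_int l i (by omega)
    have e1 : PySem.List.pyGetD l (x - 2) 0 = l[i + 1] := by
      rw [show x - 2 = ((i + 1 : Nat) : Int) by push_cast; omega]
      exact getD_int l (i + 1) (by omega)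
    have e2 : PySem.List.pyGetD l (x - 1) 0 = l[i + 2] := by
      rw [show x - 1 = ((i + 2 : Nat) : Int) by push_cast; omega]
      exact getD_int l (i + 2) (by omega)
    have e3 : PySem.List.pyGetD l x 0 = l[i + 3] := by
      rw [show x = ((i + 3 : Nat) : Int) by push_cast; omega]
      exact getD_int l (i + 3) hlen
    rw [e0] at h0; rw [e1] at h1; rw [e2] at h2; rw [e3] at h3
    simp [h0, h1, h2, h3]
  · rintro ⟨i, hi⟩
    have hlen := prefix4_true_length s l i hi
    rw [prefix4_eq s l i hlen] at hi
    simp only [Bool.and_eq_true] at hi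
    refine ⟨(i : Int) + 3, ?_, ?_, ?_, ?_, ?_⟩
    · rw [PySem.List.mem_pyRange_one]
      constructor
      · omega
      · push_cast; omega
    · rw [show (i : Int) + 3 - 3 = ((i : Nat) : Int) by omega, getD_int l i (by omega)]
      exact hi.1
    · rw [show (i : Int) + 3 - 2 = ((i + 1 : Nat) : Int) by push_cast; omega,
          getD_int l (i + 1) (by omega)]
      exact hi.2.1
    · rw [show (i : Int) + 3 - 1 = ((i + 2 : Nat) : Int) by push_cast; omega,
          getD_int l (i + 2) (by omega)]
      exact hi.2.2.1
    · rw [show (i : Int) + 3 = ((i + 3 : Nat) : Int) by push_cast; omega,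
          getD_int l (i + 3) hlen]
      exact hi.2.2.2

-- ---- A-side counting ----

theorem foldl_count3 {P Q : Int → Prop} [DecidablePred P] [DecidablePred Q] (r : List Int) :
    ∀ c f o : Int,
      (r.foldl (fun s x => if P x then (s.1 + 1, s.2.1 + 1, s.2.2)
                           else if Q x then (s.1 + 1, s.2.1, s.2.2 + 1) else s) (c, f, o)).1
        = c + ((r.countP fun x => decide (P x) || decide (Q x)) : Int) := by
  induction r with
  | nil => intro c f o; simp
  | cons x t ih =>
    intro c f o
    rw [List.foldl_cons, List.countP_cons]
    by_cases h1 : P x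
    · rw [if_pos h1, ih, if_pos (by simp [h1])]
      push_cast; ring
    · rw [if_neg h1]
      by_cases h2 : Q x
      · rw [if_pos h2, ih, if_pos (by simp [h2])]
        push_cast; ring
      · rw [if_neg h2, ih, if_neg (by simp [h1, h2])]
        simp

theorem foldl_count1 {P Q : Int → Prop} [DecidablePred P] [DecidablePred Q] (r : List Int) :
    ∀ c : Int,
      (r.foldl (fun c x => if P x then c + 1 else if Q x then c + 1 else c) c)
        = c + ((r.countP fun x => decide (P x) || decide (Q x)) : Int) := by
  induction r with
  | nil => intro c; simp
  | cons x t ih =>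
    intro c
    rw [List.foldl_cons, List.countP_cons]
    by_cases h1 : P x
    · rw [if_pos h1, ih, if_pos (by simp [h1])]
      push_cast; ring
    · rw [if_neg h1]
      by_cases h2 : Q x
      · rw [if_pos h2, ih, if_pos (by simp [h2])]
        push_cast; ring
      · rw [if_neg h2, ih, if_neg (by simp [h1, h2])]
        simp

theorem A_eq (l : List Int) :
    parallel_checker l = (!hasPair l && (!hasWin isThird l && !hasWin isSixth l)) := by
  simp only [parallel_checker]
  rw [foldl_count1 (P := fun x => PySem.List.pyGetD l (x - 3) 0 ∈ ([3, 4] : List Int) ∧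
        PySem.List.pyGetD l (x - 2) 0 ∈ ([3, 4] : List Int) ∧
        PySem.List.pyGetD l (x - 1) 0 ∈ ([3, 4] : List Int) ∧
        PySem.List.pyGetD l x 0 ∈ ([3, 4] : List Int))
      (Q := fun x => PySem.List.pyGetD l (x - 3) 0 ∈ ([8, 9] : List Int) ∧
        PySem.List.pyGetD l (x - 2) 0 ∈ ([8, 9] : List Int) ∧
        PySem.List.pyGetD l (x - 1) 0 ∈ ([8, 9] : List Int) ∧
        PySem.List.pyGetD l x 0 ∈ ([8, 9] : List Int)),
      foldl_count3 (P := fun x => PySem.List.pyGetD l x 0 = 7 ∧ PySem.List.pyGetD l (x - 1) 0 = 7)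
      (Q := fun x => PySem.List.pyGetD l x 0 = 0 ∧ PySem.List.pyGetD l (x - 1) 0 = 0)]
  have hc1 : (0 < (PySem.List.pyRange 1 (l.length : Int) 1).countP fun x =>
        decide (PySem.List.pyGetD l x 0 = 7 ∧ PySem.List.pyGetD l (x - 1) 0 = 7) ||
        decide (PySem.List.pyGetD l x 0 = 0 ∧ PySem.List.pyGetD l (x - 1) 0 = 0)) ↔
      hasPair l = true := by
    rw [List.countP_pos_iff, ← exists_pair_iff]
    simp
  have hc2 : (0 < (PySem.List.pyRange 3 (l.length : Int) 1).countP fun x =>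
        decide (PySem.List.pyGetD l (x - 3) 0 ∈ ([3, 4] : List Int) ∧
          PySem.List.pyGetD l (x - 2) 0 ∈ ([3, 4] : List Int) ∧
          PySem.List.pyGetD l (x - 1) 0 ∈ ([3, 4] : List Int) ∧
          PySem.List.pyGetD l x 0 ∈ ([3, 4] : List Int)) ||
        decide (PySem.List.pyGetD l (x - 3) 0 ∈ ([8, 9] : List Int) ∧
          PySem.List.pyGetD l (x - 2) 0 ∈ ([8, 9] : List Int) ∧
          PySem.List.pyGetD l (x - 1) 0 ∈ ([8, 9] : List Int) ∧
          PySem.List.pyGetD l x 0 ∈ ([8, 9] : List Int))) ↔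
      (hasWin isThird l = true ∨ hasWin isSixth l = true) := by
    rw [List.countP_pos_iff, ← exists_win_iff isThird, ← exists_win_iff isSixth]
    simp only [Bool.or_eq_true, decide_eq_true_eq]
    constructor
    · rintro ⟨x, hx, h | h⟩
      · exact Or.inl ⟨x, hx, by simp at h; simp [isThird]; tauto⟩
      · exact Or.inr ⟨x, hx, by simp at h; simp [isSixth]; tauto⟩
    · rintro (⟨x, hx, h⟩ | ⟨x, hx, h⟩)
      · refine ⟨x, hx, Or.inl ?_⟩
        simp [isThird] at h; simp; tauto
      · refine ⟨x, hx, Or.inr ?_⟩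
        simp [isSixth] at h; simp; tauto
  set c1 := (PySem.List.pyRange 1 (l.length : Int) 1).countP _ with hc1d
  set c2 := (PySem.List.pyRange 3 (l.length : Int) 1).countP _ with hc2d
  by_cases hgt : (1 : Int) + c1 + c2 > 1
  · rw [if_pos hgt]
    have : 0 < c1 ∨ 0 < c2 := by omega
    rcases this with h | h
    · rw [hc1.mp h]; simp
    · rcases hc2.mp h with h' | h' <;> rw [h'] <;> simp
  · rw [if_neg hgt]
    have h1 : ¬ 0 < c1 := by omega
    have h2 : ¬ 0 < c2 := by omega
    have e1 : hasPair l = false := by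
      cases h : hasPair l
      · rfl
      · exact absurd (hc1.mpr h) h1
    have e3 : hasWin isThird l = false := by
      cases h : hasWin isThird l
      · rfl
      · exact absurd (hc2.mpr (Or.inl h)) h2
    have e6 : hasWin isSixth l = false := by
      cases h : hasWin isSixth l
      · rfl
      · exact absurd (hc2.mpr (Or.inr h)) h2
    rw [e1, e3, e6]
    rfl


-- ===== VERDICT =====
theorem parallel_checker_spec : Claim_equal_parallel_checker := by
  intro l _
  show parallel_checker l = parallel_checker_alt l
  rw [A_eq, alt_eq]
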